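-- pv_equiv track=rewrite | github.com/ChartinoLabs/Muninn | src/muninn/parsers/nxos/show_ip_bgp_summary.py | _strip_noise
-- ===== SOURCE A (Python) =====
-- def _is_noise_line(stripped: str) -> bool:
--     """Return True if a stripped line is a leading prompt/noise line."""
--     if not stripped:
--         return True
--     if stripped.endswith("#") or "#show " in stripped.lower():
--         return True
--     return stripped.startswith("Load for ") or stripped.startswith("Time source ")
--
-- def _strip_noise(lines: list[str]) -> list[str]:
--     """Strip leading and trailing prompt/noise lines."""
--     result: list[str] = []
--     started = False
--     for line in lines:
--         if not started:
--             if _is_noise_line(line.strip()):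
--                 continue
--             started = True
--         result.append(line)
--
--     # Strip trailing noise
--     while result and _is_noise_line(result[-1].strip()):
--         result.pop()
--
--     return result
-- ===== SOURCE B (Python) =====
-- def _is_noise_line(stripped: str) -> bool:
--     """Return True if a stripped line is a leading prompt/noise line."""
--     if not stripped:
--         return True
--     if stripped.endswith("#") or "#show " in stripped.lower():
--         return True
--     return stripped.startswith("Load for ") or stripped.startswith("Time source ")
--
-- def _strip_noise(lines: list[str]) -> list[str]:
--     """Strip leading and trailing prompt/noise lines (two-pointer boundary scan + slice)."""
--     start = 0
--     stop = len(lines)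
--     while start < stop and _is_noise_line(lines[start].strip()):
--         start += 1
--     while stop > start and _is_noise_line(lines[stop - 1].strip()):
--         stop -= 1
--     return lines[start:stop]
-- ===== Notes on version B (the rewrite author's own statement) =====
-- stated objective: simpler
-- what changed: Replaces the accumulate-with-started-flag loop plus trailing pop-loop by two boundary index scans (first and last non-noise line) and a single slice of the input.
import Mathlib
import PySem

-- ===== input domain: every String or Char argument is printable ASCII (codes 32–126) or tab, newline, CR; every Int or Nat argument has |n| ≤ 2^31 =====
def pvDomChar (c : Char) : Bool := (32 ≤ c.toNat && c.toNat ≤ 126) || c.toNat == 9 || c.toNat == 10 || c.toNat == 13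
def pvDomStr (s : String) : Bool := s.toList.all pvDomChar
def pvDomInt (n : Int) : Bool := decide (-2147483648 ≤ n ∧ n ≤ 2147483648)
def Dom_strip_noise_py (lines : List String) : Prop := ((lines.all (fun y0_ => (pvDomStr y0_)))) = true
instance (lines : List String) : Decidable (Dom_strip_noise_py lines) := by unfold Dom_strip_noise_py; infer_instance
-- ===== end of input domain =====

-- B replaces A's accumulate-with-started-flag loop plus trailing pop-loop by two boundary
-- index scans and a single slice (objective: simpler decomposition).

-- ===== PORT A =====
-- shared helper _is_noise_line (the same Python helper is used by both A and B)
def is_noise_line (stripped : String) : Bool :=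
  if stripped.toList = [] then true
  else if PySem.Str.endswith stripped "#" || PySem.Str.isIn "#show " (PySem.Str.lower stripped) then true
  else PySem.Str.startswith stripped "Load for " || PySem.Str.startswith stripped "Time source "

-- A's trailing while-pop loop: while result and _is_noise_line(result[-1].strip()): result.pop()
def popTrailing (r : List String) : List String :=
  if h : r ≠ [] then
    if is_noise_line (PySem.Str.strip (PySem.List.pyGetD r (-1) "")) then
      popTrailing r.dropLast
    else r
  else r
termination_by r.length
decreasing_by
  have : 0 < r.length := List.length_pos_of_ne_nil h
  simp only [List.length_dropLast]; omega

def strip_noise_py (lines : List String) : List String :=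
  let st := lines.foldl
    (fun (st : List String × Bool) (line : String) =>
      if !st.2 then
        if is_noise_line (PySem.Str.strip line) then st
        else (st.1 ++ [line], true)
      else (st.1 ++ [line], st.2))
    ([], false)
  popTrailing st.1

-- ===== PORT B =====
-- B's first while loop: advance start over leading noise lines
def scanFront (lines : List String) (start stop : Nat) : Nat :=
  if start < stop ∧ is_noise_line (PySem.Str.strip (lines.getD start "")) = true then
    scanFront lines (start + 1) stop
  else start
termination_by stop - start
decreasing_by omega

-- B's second while loop: retreat stop over trailing noise lines
def scanBack (lines : List String) (start stop : Nat) : Nat :=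
  if start < stop ∧ is_noise_line (PySem.Str.strip (lines.getD (stop - 1) "")) = true then
    scanBack lines start (stop - 1)
  else stop
termination_by stop
decreasing_by omega

def strip_noise_py_alt (lines : List String) : List String :=
  let start := scanFront lines 0 lines.length
  let stop := scanBack lines start lines.length
  PySem.List.slice lines (some (start : Int)) (some (stop : Int))

-- ===== PRECONDITION & SPEC =====
def Spec_strip_noise_py (lines : List String) (out : List String) : Prop := out = strip_noise_py_alt lines
instance (lines : List String) (out : List String) : Decidable (Spec_strip_noise_py lines out) := by unfold Spec_strip_noise_py; infer_instance

-- ===== CLAIM (what is proved, stated in full; the proofs are below) =====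
def Claim_equal_strip_noise_py : Prop := ∀ (lines : List String), Dom_strip_noise_py lines → Spec_strip_noise_py lines (strip_noise_py lines)

-- ===== LEMMAS AND PROOFS =====

-- the per-line noise test, as used by both ports (proof-side abbreviation)
def pNoise (l : String) : Bool := is_noise_line (PySem.Str.strip l)

theorem foldl_started (ls : List String) (r : List String) :
    (ls.foldl
      (fun (st : List String × Bool) (line : String) =>
        if !st.2 then
          if is_noise_line (PySem.Str.strip line) then st
          else (st.1 ++ [line], true)
        else (st.1 ++ [line], st.2))
      (r, true)).1 = r ++ ls := by
  induction ls generalizing r with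
  | nil => simp
  | cons a tl ih => simpa using ih (r ++ [a])

theorem foldl_notStarted (ls : List String) (r : List String) :
    (ls.foldl
      (fun (st : List String × Bool) (line : String) =>
        if !st.2 then
          if is_noise_line (PySem.Str.strip line) then st
          else (st.1 ++ [line], true)
        else (st.1 ++ [line], st.2))
      (r, false)).1 = r ++ ls.dropWhile pNoise := by
  induction ls generalizing r with
  | nil => simp
  | cons a tl ih =>
    by_cases h : pNoise a
    · have h' : is_noise_line (PySem.Str.strip a) = true := h
      rw [List.foldl_cons, List.dropWhile_cons_of_pos h]
      simpa [h'] using ih r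
    · have h' : is_noise_line (PySem.Str.strip a) = false := by simpa [pNoise] using h
      rw [List.foldl_cons, List.dropWhile_cons_of_neg (by simp [h])]
      simpa [h'] using foldl_started tl (r ++ [a])

theorem popTrailing_eq (r : List String) : popTrailing r = r.rdropWhile pNoise := by
  by_cases h : r = []
  · subst h; rw [popTrailing]; simp
  · have hlast : PySem.List.pyGetD r (-1) "" = r.getLast h :=
      PySem.List.pyGetD_neg_one r "" h
    rw [popTrailing, dif_pos h]
    by_cases hp : is_noise_line (PySem.Str.strip (PySem.List.pyGetD r (-1) "")) = true
    · rw [if_pos hp, popTrailing_eq r.dropLast]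
      conv_rhs => rw [← List.dropLast_concat_getLast h]
      rw [List.rdropWhile_concat_pos]
      simpa [pNoise, hlast] using hp
    · rw [if_neg hp]
      symm
      rw [List.rdropWhile_eq_self_iff]
      intro _
      simpa [pNoise, hlast] using hp
termination_by r.length
decreasing_by
  have : 0 < r.length := List.length_pos_of_ne_nil h
  simp only [List.length_dropLast]; omega

theorem scanFront_eq (lines : List String) (k start : Nat)
    (hk : lines.length - start = k) (h : start ≤ lines.length) :
    scanFront lines start lines.length = start + ((lines.drop start).takeWhile pNoise).length := by
  induction k generalizing start with
  | zero =>
    have hs : start = lines.length := by omega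
    rw [scanFront, if_neg (by omega)]
    rw [hs, List.drop_length]
    simp
  | succ k ih =>
    have hlt : start < lines.length := by omega
    have hget : lines.getD start "" = lines[start] := List.getD_eq_getElem lines "" hlt
    have hd : lines.drop start = lines[start] :: lines.drop (start + 1) :=
      List.drop_eq_getElem_cons hlt
    rw [scanFront]
    split_ifs with hc
    · rw [ih (start + 1) (by omega) (by omega)]
      rw [hd, List.takeWhile_cons_of_pos (by rw [hget] at hc; exact hc.2)]
      simp; omega
    · rw [hd, List.takeWhile_cons_of_neg (by rw [hget] at hc; exact fun hp => hc ⟨hlt, hp⟩)]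
      simp

theorem region_concat (lines : List String) (start stop : Nat)
    (hlt : start < stop) (h2 : stop ≤ lines.length) :
    (lines.drop start).take (stop - start)
      = (lines.drop start).take (stop - 1 - start) ++ [lines[stop - 1]] := by
  have he : stop - start = (stop - 1 - start) + 1 := by omega
  rw [he, List.take_add_one, List.getElem?_drop]
  have : start + (stop - 1 - start) = stop - 1 := by omega
  rw [this, List.getElem?_eq_getElem (by omega)]
  rfl

theorem scanBack_eq (lines : List String) (k start stop : Nat)
    (hk : stop - start = k) (h1 : start ≤ stop) (h2 : stop ≤ lines.length) :
    scanBack lines start stop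
      = start + (((lines.drop start).take (stop - start)).rdropWhile pNoise).length := by
  induction k generalizing stop with
  | zero =>
    have hs : stop = start := by omega
    rw [scanBack, if_neg (by omega), hs]
    simp
  | succ k ih =>
    have hlt : start < stop := by omega
    have hget : lines.getD (stop - 1) "" = lines[stop - 1] :=
      List.getD_eq_getElem lines "" (by omega)
    have hr := region_concat lines start stop hlt h2
    rw [scanBack]
    split_ifs with hc
    · rw [ih (stop - 1) (by omega) (by omega) (by omega)]
      rw [hr, List.rdropWhile_concat_pos _ _ _ (by rw [hget] at hc; exact hc.2)]
    · have hp : ¬ pNoise lines[stop - 1] := by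
        rw [hget] at hc; exact fun hp => hc ⟨hlt, hp⟩
      have hself : ((lines.drop start).take (stop - start)).rdropWhile pNoise
          = (lines.drop start).take (stop - start) := by
        rw [List.rdropWhile_eq_self_iff]
        intro hne
        have hsome : ((lines.drop start).take (stop - start)).getLast? = some lines[stop - 1] := by
          rw [hr]; exact List.getLast?_concat
        have := List.getLast?_eq_some_getLast (l := (lines.drop start).take (stop - start)) hne
        rw [this] at hsome
        rw [Option.some_inj.mp hsome]
        exact hp
      rw [hself, List.length_take]
      simp [List.length_drop]; omega

theorem dropWhile_eq_drop_len (p : String → Bool) (l : List String) :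
    l.dropWhile p = l.drop (l.takeWhile p).length := by
  have h := List.drop_left (l₁ := l.takeWhile p) (l₂ := l.dropWhile p)
  rw [List.takeWhile_append_dropWhile] at h
  exact h.symm

-- ===== VERDICT (by name: the statement is the Claim_ definition above) =====
theorem strip_noise_py_spec : Claim_equal_strip_noise_py := by
  intro lines _
  unfold Spec_strip_noise_py strip_noise_py strip_noise_py_alt
  dsimp only
  rw [foldl_notStarted lines [], List.nil_append, popTrailing_eq]
  set n := lines.length with hn
  have hstart : scanFront lines 0 n = (lines.takeWhile pNoise).length := by
    rw [scanFront_eq lines n 0 (by omega) (by omega)]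
    simp
  have hslen : (lines.takeWhile pNoise).length ≤ n := by
    simpa [hn] using (List.takeWhile_prefix (l := lines) (p := pNoise)).length_le
  have hdrop : lines.drop (lines.takeWhile pNoise).length = lines.dropWhile pNoise :=
    (dropWhile_eq_drop_len pNoise lines).symm
  have hlen_dw : (lines.dropWhile pNoise).length = n - (lines.takeWhile pNoise).length := by
    have : (lines.takeWhile pNoise).length + (lines.dropWhile pNoise).length = n := by
      rw [← List.length_append, List.takeWhile_append_dropWhile]
    omega
  have htake : (lines.drop (lines.takeWhile pNoise).length).take (n - (lines.takeWhile pNoise).length)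
      = lines.dropWhile pNoise := by
    rw [hdrop, ← hlen_dw, List.take_length]
  have hstop : scanBack lines ((lines.takeWhile pNoise).length) n
      = (lines.takeWhile pNoise).length + ((lines.dropWhile pNoise).rdropWhile pNoise).length := by
    rw [scanBack_eq lines (n - (lines.takeWhile pNoise).length) _ n (by omega) hslen (by omega)]
    rw [htake]
  rw [hstart, hstop, PySem.List.slice_natCast]
  have hpre : (lines.dropWhile pNoise).rdropWhile pNoise <+: lines.dropWhile pNoise :=
    List.rdropWhile_prefix pNoise (lines.dropWhile pNoise)
  rw [show (lines.takeWhile pNoise).length + ((lines.dropWhile pNoise).rdropWhile pNoise).length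
        - (lines.takeWhile pNoise).length
      = ((lines.dropWhile pNoise).rdropWhile pNoise).length by omega]
  rw [hdrop]
  exact List.prefix_iff_eq_take.mp hpre
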